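-- pv_equiv track=rewrite | github.com/Mincheol710313/Algorithm | Programmers/Hash/Clothes.py | solution
-- ===== SOURCE A (Python) =====
-- from itertools import combinations
--
-- def solution(clothes):
--     answer = 0
--
--     clothes_hash = {}
--
--     for clothe in clothes:
--         _, key = clothe[0], clothe[1]
--
--         if key not in clothes_hash.keys():
--             clothes_hash[key] = 1
--         else:
--             clothes_hash[key] += 1
--
--     key_len = len(clothes_hash.keys())
--
--     for lenght in range(1,key_len + 1):
--         for clothe_keys in combinations(clothes_hash.keys(), lenght):
--             count = 1
--             for key in clothe_keys:
--                 count *= clothes_hash.get(key)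
--             answer += count
--
--     return answer
-- ===== SOURCE B (Python) =====
-- def solution(clothes):
--     counts = {}
--     for _, key in clothes:
--         counts[key] = counts.get(key, 0) + 1
--     ways = 1
--     for c in counts.values():
--         ways *= c + 1
--     return ways - 1
-- ===== Notes on version B (the rewrite author's own statement) =====
-- stated objective: faster
-- what changed: Replaces the enumeration of all non-empty key combinations (summing products of counts over every subset) with the closed form: product of (count+1) over categories, minus 1.
import Mathlib
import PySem

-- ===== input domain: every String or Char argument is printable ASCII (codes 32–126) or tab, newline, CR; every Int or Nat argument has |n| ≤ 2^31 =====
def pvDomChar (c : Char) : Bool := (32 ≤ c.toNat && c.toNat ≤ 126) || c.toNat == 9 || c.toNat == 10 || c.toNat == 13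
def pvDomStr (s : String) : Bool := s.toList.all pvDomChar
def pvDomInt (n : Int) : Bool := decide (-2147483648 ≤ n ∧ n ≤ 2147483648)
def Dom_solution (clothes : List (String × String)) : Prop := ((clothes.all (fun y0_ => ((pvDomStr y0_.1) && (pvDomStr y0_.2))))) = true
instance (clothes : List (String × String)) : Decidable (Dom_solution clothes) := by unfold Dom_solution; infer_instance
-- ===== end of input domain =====

-- B replaces A's enumeration of all non-empty key combinations with the closed form
-- prod(count+1) - 1 over the categories (objective: faster, asymptotically).


-- ===== PORT A =====
-- itertools.combinations(l, n), transliterated structurally (same lexicographic order).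
def combA (n : Nat) (l : List String) : List (List String) :=
  match n, l with
  | 0, _ => [[]]
  | _ + 1, [] => []
  | n + 1, x :: xs => (combA n xs).map (x :: ·) ++ combA (n + 1) xs

-- A: build the per-key counter with an explicit membership test, then sum, over every
-- combination length 1..k and every combination of keys, the product of the counts.
-- `clothes_hash.get(key)` (an int whenever key ∈ keys) is ported as `(d.get? k).getD 0`.
def solution (clothes : List (String × String)) : Int :=
  let clothesHash : PySem.Dict String Int :=
    clothes.foldl
      (fun d p =>
        if ¬ d.contains p.2 then d.insert p.2 1
        else d.insert p.2 (d.getD p.2 0 + 1))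
      PySem.Dict.empty
  let keyLen : Int := clothesHash.keys.length
  (PySem.List.pyRange 1 (keyLen + 1) 1).foldl
    (fun answer lenght =>
      (combA lenght.toNat clothesHash.keys).foldl
        (fun answer clotheKeys =>
          answer + clotheKeys.foldl (fun count key => count * (clothesHash.get? key).getD 0) 1)
        answer)
    0

-- ===== PORT B =====
def solution_alt (clothes : List (String × String)) : Int :=
  let counts : PySem.Dict String Int :=
    clothes.foldl (fun d p => d.insert p.2 (d.getD p.2 0 + 1)) PySem.Dict.empty
  counts.values.foldl (fun ways c => ways * (c + 1)) 1 - 1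

-- ===== PRECONDITION & SPEC =====
def Spec_solution (clothes : List (String × String)) (out : Int) : Prop := out = solution_alt clothes
instance (clothes : List (String × String)) (out : Int) : Decidable (Spec_solution clothes out) := by unfold Spec_solution; infer_instance

-- ===== CLAIM (what is proved, stated in full; the proofs are below) =====
def Claim_equal_solution : Prop := ∀ (clothes : List (String × String)), Dom_solution clothes → Spec_solution clothes (solution clothes)

-- ===== LEMMAS AND PROOFS =====

-- The sum, over combinations of a fixed size, of the products of g over the chosen keys.
def scomb (g : String → Int) (n : Nat) (l : List String) : Int :=
  ((combA n l).map (fun ck => (ck.map g).prod)).sum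

theorem scomb_zero (g : String → Int) (l : List String) : scomb g 0 l = 1 := by
  simp [scomb, combA]

theorem scomb_succ_cons (g : String → Int) (n : Nat) (x : String) (xs : List String) :
    scomb g (n + 1) (x :: xs) = g x * scomb g n xs + scomb g (n + 1) xs := by
  simp [scomb, combA, List.map_map, Function.comp_def, List.sum_map_mul_left]

theorem combA_eq_nil (n : Nat) (l : List String) (h : l.length < n) : combA n l = [] := by
  induction l generalizing n with
  | nil => cases n with | zero => omega | succ m => simp [combA]
  | cons x xs ih =>
    cases n with
    | zero => omega
    | succ m =>
      simp only [combA]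
      rw [ih m (by simpa using h), ih (m + 1) (by simp at h ⊢; omega)]
      simp

theorem scomb_of_lt (g : String → Int) (n : Nat) (l : List String) (h : l.length < n) :
    scomb g n l = 0 := by
  simp [scomb, combA_eq_nil n l h]

-- Total over ALL sizes 0..len l (including the empty combination).
theorem scomb_total (g : String → Int) (l : List String) :
    ∑ n ∈ Finset.range (l.length + 1), scomb g n l = ((l.map g).map (· + 1)).prod := by
  induction l with
  | nil => simp [scomb_zero]
  | cons x xs ih =>
    have hlen : (x :: xs).length + 1 = (xs.length + 1) + 1 := by simp
    rw [hlen, Finset.sum_range_succ']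
    have h1 : ∀ j ∈ Finset.range (xs.length + 1),
        scomb g (j + 1) (x :: xs) = g x * scomb g j xs + scomb g (j + 1) xs := by
      intro j _; exact scomb_succ_cons g j x xs
    rw [Finset.sum_congr rfl h1, Finset.sum_add_distrib, ← Finset.mul_sum, ih, scomb_zero]
    have h2 : ∑ j ∈ Finset.range (xs.length + 1), scomb g (j + 1) xs
        = ((xs.map g).map (· + 1)).prod - 1 := by
      have := Finset.sum_range_succ' (fun n => scomb g n xs) (xs.length + 1)
      rw [Finset.sum_range_succ, scomb_of_lt g (xs.length + 1) xs (by omega), ih, scomb_zero] at this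
      omega
    rw [h2]; simp; ring

theorem foldl_mul_one {α : Type} (l : List α) (f : α → Int) (init : Int) :
    l.foldl (fun a c => a * f c) init = init * (l.map f).prod := by
  induction l generalizing init with
  | nil => simp
  | cons x xs ih => simp [List.foldl_cons, ih, mul_assoc]

theorem solution_spec_aux (clothes : List (String × String)) :
    solution clothes = solution_alt clothes := by
  -- the two counter-building loops build the same dict
  have hstep : (fun (d : PySem.Dict String Int) (p : String × String) =>
        if ¬ d.contains p.2 then d.insert p.2 1
        else d.insert p.2 (d.getD p.2 0 + 1))
      = (fun d p => d.insert p.2 (d.getD p.2 0 + 1)) := by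
    funext d p
    by_cases h : d.contains p.2
    · simp [h]
    · have h0 : d.getD p.2 0 = 0 :=
        PySem.Dict.getD_of_not_contains d 0 (by simpa using h)
      simp [h, h0]
  unfold solution solution_alt
  rw [hstep]
  set d : PySem.Dict String Int :=
    clothes.foldl (fun d p => d.insert p.2 (d.getD p.2 0 + 1)) PySem.Dict.empty with hd
  show (PySem.List.pyRange 1 ((d.keys.length : Int) + 1) 1).foldl
      (fun answer lenght =>
        (combA lenght.toNat d.keys).foldl
          (fun answer clotheKeys =>
            answer + clotheKeys.foldl (fun count key => count * (d.get? key).getD 0) 1)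
          answer) 0
    = d.values.foldl (fun ways c => ways * (c + 1)) 1 - 1
  have hnd : d.keys.Nodup := by
    rw [hd]
    exact PySem.Dict.nodup_keys_foldl_insert_key clothes Prod.snd _ _ PySem.Dict.nodup_keys_empty
  set g : String → Int := fun k => d.getD k 0 with hg
  -- rewrite A's side into scomb sums
  have hget : ∀ k, (d.get? k).getD 0 = g k := by
    intro k
    show (d.get? k).getD 0 = d.getD k 0
    rw [PySem.Dict.getD_eq_get?_getD]
  have hinner : ∀ (ck : List String) (c : Int),
      ck.foldl (fun count key => count * (d.get? key).getD 0) c = c * (ck.map g).prod := by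
    intro ck c
    simp only [hget]
    exact foldl_mul_one ck g c
  have hmid : ∀ (n : Nat) (a : Int),
      (combA n d.keys).foldl
        (fun answer ck => answer + ck.foldl (fun count key => count * (d.get? key).getD 0) 1) a
      = a + scomb g n d.keys := by
    intro n a
    have h1 : ∀ (ck : List String), ck.foldl (fun count key => count * (d.get? key).getD 0) 1
        = (ck.map g).prod := by intro ck; simpa using hinner ck 1
    calc (combA n d.keys).foldl
          (fun answer ck => answer + ck.foldl (fun count key => count * (d.get? key).getD 0) 1) a
        = (combA n d.keys).foldl (fun answer ck => answer + (ck.map g).prod) a := by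
          simp only [h1]
      _ = a + scomb g n d.keys := by
          rw [scomb]; exact PySem.List.foldl_add (combA n d.keys) _ a
  -- the values side of B
  have hvals : d.values = d.keys.map g := PySem.Dict.values_eq_map_keys d hnd 0
  rw [hvals, List.foldl_map, foldl_mul_one d.keys (fun y => g y + 1) 1, one_mul]
  -- outer loop: sum over lengths 1..k
  set k : Nat := d.keys.length with hk
  have houter :
      (PySem.List.pyRange 1 ((k : Int) + 1) 1).foldl
        (fun answer lenght =>
          (combA lenght.toNat d.keys).foldl
            (fun answer ck => answer + ck.foldl (fun count key => count * (d.get? key).getD 0) 1)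
            answer) 0
      = ∑ j ∈ Finset.range k, scomb g (j + 1) d.keys := by
    rw [PySem.List.pyRange_one, List.foldl_map]
    have : ∀ (m : Nat), m ≤ k →
        ((List.range m).foldl
          (fun answer (j : Nat) =>
            (combA ((1 + (j : Int)).toNat) d.keys).foldl
              (fun answer ck => answer + ck.foldl (fun count key => count * (d.get? key).getD 0) 1)
              answer) 0)
        = ∑ j ∈ Finset.range m, scomb g (j + 1) d.keys := by
      intro m hm
      induction m with
      | zero => simp
      | succ i ih =>
        rw [List.range_succ, List.foldl_append, ih (by omega), List.foldl_cons, List.foldl_nil,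
          hmid, Finset.sum_range_succ]
        congr 2
        omega
    have hcast : (((k : Int) + 1 - 1)).toNat = k := by omega
    rw [hcast]
    exact this k le_rfl
  rw [houter]
  -- and the closed form
  have htot := scomb_total g d.keys
  rw [Finset.sum_range_succ'] at htot
  simp only [scomb_zero, List.map_map, Function.comp_def] at htot
  rw [← hk] at htot
  omega

-- ===== VERDICT (by name: the statement is the Claim_ definition above) =====
theorem solution_spec : Claim_equal_solution := by
  intro clothes _
  unfold Spec_solution
  exact solution_spec_aux clothes
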